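-- pv_equiv track=rewrite | github.com/d-pascenco/bridges_watcher | x_core.py | aggregate_logs
-- ===== SOURCE A (Python) =====
-- from collections import defaultdict, Counter
--
-- def aggregate_logs(logs):
--     groups = defaultdict(list)
--     for l in logs:
--         groups[l['name']].append(l)
--     res = []
--     for grp in groups.values():
--         if len(grp) == 1:
--             res.append(grp[0])
--         else:
--             base = grp[0].copy()
--             base['rest'] = "\n".join(x['rest'] for x in grp)
--             res.append(base)
--     return res
-- ===== SOURCE B (Python) =====
-- def aggregate_logs(logs):
--     res = []
--     remaining = list(logs)
--     while remaining:
--         first = remaining[0]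
--         name = first['name']
--         same = [l for l in remaining[1:] if l['name'] == name]
--         remaining = [l for l in remaining[1:] if l['name'] != name]
--         if same:
--             merged = dict(first)
--             merged['rest'] = "\n".join(l['rest'] for l in [first] + same)
--             res.append(merged)
--         else:
--             res.append(first)
--     return res
-- ===== Notes on version B (the rewrite author's own statement) =====
-- stated objective: alternative
-- what changed: Replaces A's two-phase defaultdict grouping followed by an aggregation pass with an iterative partition: repeatedly take the first remaining log, sweep out all later logs sharing its name, emit that group's aggregate immediately, and continue on the rest; Pre_ excludes only inputs where A raises KeyError (a log without 'name', or a log in a group of 2+ without 'rest').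
import Mathlib
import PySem

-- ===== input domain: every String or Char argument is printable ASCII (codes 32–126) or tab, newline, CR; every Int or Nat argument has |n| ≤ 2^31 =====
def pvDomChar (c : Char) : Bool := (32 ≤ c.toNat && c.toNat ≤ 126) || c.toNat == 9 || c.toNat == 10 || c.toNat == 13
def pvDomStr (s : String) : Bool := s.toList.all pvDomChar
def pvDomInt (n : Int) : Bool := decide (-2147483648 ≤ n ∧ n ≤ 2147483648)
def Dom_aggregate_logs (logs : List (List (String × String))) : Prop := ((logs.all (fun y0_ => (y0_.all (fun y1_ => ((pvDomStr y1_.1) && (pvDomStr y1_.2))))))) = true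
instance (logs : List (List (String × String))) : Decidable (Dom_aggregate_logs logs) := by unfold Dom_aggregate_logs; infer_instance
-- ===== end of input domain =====

-- B replaces A's two-phase defaultdict grouping + aggregation by an iterative partition:
-- repeatedly take the first remaining log, sweep out all later logs with the same name,
-- emit its aggregate, and continue on the rest (objective: alternative decomposition).

-- l['name'] / l['rest'] (Pre_ guarantees the key is present wherever A reads it)
def pvName (l : List (String × String)) : String := PySem.Dict.getD (PySem.Dict.mk l) "name" ""
def pvRest (l : List (String × String)) : String := PySem.Dict.getD (PySem.Dict.mk l) "rest" ""

-- ===== PORT A =====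
def aggregate_logs (logs : List (List (String × String))) : List (List (String × String)) :=
  -- groups = defaultdict(list); for l in logs: groups[l['name']].append(l)
  let groups : PySem.Dict String (List (List (String × String))) :=
    logs.foldl (fun g l => g.modify (pvName l) [] (fun v => v ++ [l])) PySem.Dict.empty
  -- res = []; for grp in groups.values(): …
  groups.values.foldl (fun res grp =>
    if grp.length == 1 then
      res ++ [PySem.List.pyGetD grp 0 []]
    else
      -- base = grp[0].copy(); base['rest'] = "\n".join(x['rest'] for x in grp)
      res ++ [(PySem.Dict.insert (PySem.Dict.mk (PySem.List.pyGetD grp 0 []))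
                "rest" (PySem.Str.join "\n" (grp.map pvRest))).items]) []

-- ===== PORT B =====
def aggregate_logs_alt (logs : List (List (String × String))) : List (List (String × String)) :=
  match logs with
  | [] => []
  | first :: rest =>
    let name := pvName first
    let same := rest.filter (fun l => pvName l == name)
    let remaining := rest.filter (fun l => !(pvName l == name))
    (if same.isEmpty then
       [first]
     else
       [(PySem.Dict.insert (PySem.Dict.mk first) "rest"
          (PySem.Str.join "\n" ((first :: same).map pvRest))).items])
    ++ aggregate_logs_alt remaining
termination_by logs.length
decreasing_by
  simp only [List.length_cons, List.length_unattach]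
  exact Nat.lt_succ_of_le (le_trans (List.length_filter_le _ _) (by simp))

-- ===== PRECONDITION & SPEC =====
-- Pre_ excludes exactly the inputs on which Python A raises KeyError: a log without a
-- 'name' key, or a log in a group of two or more without a 'rest' key.
def Pre_aggregate_logs (logs : List (List (String × String))) : Prop :=
  ∀ l ∈ logs, (PySem.Dict.mk l).contains "name" = true ∧
    (2 ≤ logs.countP (fun m => pvName m == pvName l) → (PySem.Dict.mk l).contains "rest" = true)
instance (logs : List (List (String × String))) : Decidable (Pre_aggregate_logs logs) := by
  unfold Pre_aggregate_logs; infer_instance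

def pvWitness_aggregate_logs : (List (List (String × String))) :=
  [[("name", "a")], [("name", "b"), ("rest", "x")], [("name", "b"), ("rest", "y")]]

def Spec_aggregate_logs (logs : List (List (String × String))) (out : List (List (String × String))) : Prop := out = aggregate_logs_alt logs
instance (logs : List (List (String × String))) (out : List (List (String × String))) : Decidable (Spec_aggregate_logs logs out) := by unfold Spec_aggregate_logs; infer_instance

-- ===== CLAIM (what is proved, stated in full; the proofs are below) =====
def Claim_equal_aggregate_logs : Prop := ∀ (logs : List (List (String × String))), Dom_aggregate_logs logs → Pre_aggregate_logs logs → Spec_aggregate_logs logs (aggregate_logs logs)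

-- ===== LEMMAS AND PROOFS =====

-- the per-group aggregate both programs produce
def pvAgg (grp : List (List (String × String))) : List (String × String) :=
  if grp.length == 1 then PySem.List.pyGetD grp 0 []
  else (PySem.Dict.insert (PySem.Dict.mk (PySem.List.pyGetD grp 0 []))
          "rest" (PySem.Str.join "\n" (grp.map pvRest))).items

-- canonical form both ports are reduced to: one aggregate per distinct name,
-- in first-occurrence order
def pvCanon (logs : List (List (String × String))) : List (List (String × String)) :=
  (PySem.List.dedup (logs.map pvName)).map
    (fun n => pvAgg (logs.filter (fun l => pvName l == n)))

theorem pyGetD_zero_cons {α : Type} (x : α) (xs : List α) (d : α) :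
    PySem.List.pyGetD (x :: xs) 0 d = x := by
  simp [pysem]

theorem contains_single {α : Type} [BEq α] [LawfulBEq α] (x y : α) :
    PySem.Set.contains [x] y = (y == x) := by
  simp [PySem.Set.contains]

theorem ofList_cons {α : Type} [BEq α] [LawfulBEq α] (x : α) (xs : List α) :
    PySem.Set.ofList (x :: xs) = x :: (PySem.Set.ofList xs).filter (fun y => !(y == x)) := by
  rw [← PySem.Set.update_empty, PySem.Set.update_cons]
  have hadd : (PySem.Set.add PySem.Set.empty x) = [x] := by
    simp [PySem.Set.add, PySem.Set.empty, PySem.Set.contains]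
  rw [hadd, PySem.Set.update_eq_append_filter]
  simp only [contains_single]
  rfl

theorem ofList_filter {α : Type} [BEq α] [LawfulBEq α] (p : α → Bool) (xs : List α) :
    (PySem.Set.ofList xs).filter p = PySem.Set.ofList (xs.filter p) := by
  induction xs with
  | nil => rfl
  | cons x xs ih =>
    rw [ofList_cons, List.filter_cons]
    by_cases hp : p x = true
    · rw [if_pos hp, List.filter_cons_of_pos hp, ofList_cons, List.filter_comm, ih]
    · simp only [Bool.not_eq_true] at hp
      have hx : x ∉ PySem.Set.ofList (xs.filter p) := by
        rw [PySem.Set.mem_ofList]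
        intro hmem
        exact absurd ((List.mem_filter.mp hmem).2) (by simp [hp])
      rw [List.filter_cons_of_neg (by simp [hp]), List.filter_comm, ih]
      rw [if_neg (by simp [hp]), List.filter_eq_self.mpr]
      intro a ha
      simp only [Bool.not_eq_true', beq_eq_false_iff_ne]
      rintro rfl; exact hx ha

theorem dedup_cons_filter {α : Type} [BEq α] [LawfulBEq α] (x : α) (xs : List α) :
    PySem.List.dedup (x :: xs) = x :: PySem.List.dedup (xs.filter (fun y => !(y == x))) := by
  rw [PySem.List.dedup_eq_ofList, PySem.List.dedup_eq_ofList, ofList_cons, ofList_filter]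

theorem aggregate_logs_eq_canon (logs : List (List (String × String))) :
    aggregate_logs logs = pvCanon logs := by
  unfold aggregate_logs
  have hfold : logs.foldl (fun g l => g.modify (pvName l) [] (fun v => v ++ [l])) PySem.Dict.empty
      = (logs.map (fun l => (pvName l, l))).foldl
          (fun g p => g.modify p.1 [] (fun v => v ++ [p.2])) PySem.Dict.empty := by
    rw [List.foldl_map]
  have hkeys : (logs.foldl (fun g l => g.modify (pvName l) [] (fun v => v ++ [l])) PySem.Dict.empty).keys
      = PySem.List.dedup (logs.map pvName) := by
    rw [PySem.Dict.keys_foldl_modify_key logs pvName [] (fun _ l => (fun v => v ++ [l]))]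
    simp [PySem.Set.update_nil_left]
  have hnodup : (logs.foldl (fun g l => g.modify (pvName l) [] (fun v => v ++ [l])) PySem.Dict.empty).keys.Nodup := by
    apply PySem.Dict.nodup_keys_foldl_modify_key logs pvName [] (fun _ l => (fun v => v ++ [l]))
    simp
  have hgetD : ∀ c, (logs.foldl (fun g l => g.modify (pvName l) [] (fun v => v ++ [l])) PySem.Dict.empty).getD c []
      = logs.filter (fun l => pvName l == c) := by
    intro c
    rw [hfold, PySem.Dict.getD_foldl_modify_append, List.filter_map]
    simp [Function.comp_def]
  have hvals : (logs.foldl (fun g l => g.modify (pvName l) [] (fun v => v ++ [l])) PySem.Dict.empty).values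
      = (PySem.List.dedup (logs.map pvName)).map
        (fun n => logs.filter (fun l => pvName l == n)) := by
    rw [PySem.Dict.values_eq_map_keys _ hnodup [], hkeys]
    exact List.map_congr_left (fun k _ => hgetD k)
  have hbody : (fun (res : List (List (String × String))) grp =>
      if grp.length == 1 then
        res ++ [PySem.List.pyGetD grp 0 []]
      else
        res ++ [(PySem.Dict.insert (PySem.Dict.mk (PySem.List.pyGetD grp 0 []))
                  "rest" (PySem.Str.join "\n" (grp.map pvRest))).items])
      = (fun res grp => res ++ [pvAgg grp]) := by
    funext res grp
    unfold pvAgg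
    split <;> rfl
  show (List.foldl _ [] _ : List (List (String × String))) = _
  rw [hbody, PySem.List.foldl_append_singleton_eq_map pvAgg, hvals, List.map_map]
  rfl

theorem alt_eq_canon (logs : List (List (String × String))) :
    aggregate_logs_alt logs = pvCanon logs := by
  generalize hn : logs.length = n
  induction n using Nat.strong_induction_on generalizing logs with
  | _ n ih =>
    match logs with
    | [] => rw [aggregate_logs_alt]; rfl
    | first :: rest =>
      rw [aggregate_logs_alt]
      have hrec : aggregate_logs_alt (rest.filter (fun l => !(pvName l == pvName first)))
          = pvCanon (rest.filter (fun l => !(pvName l == pvName first))) := by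
        apply ih _ _ _ rfl
        subst hn
        exact Nat.lt_succ_of_le (List.length_filter_le _ _)
      set name := pvName first with hname
      set same := rest.filter (fun l => pvName l == name) with hsamedef
      set remaining := rest.filter (fun l => !(pvName l == name)) with hremdef
      have hmapfilter : (rest.map pvName).filter (fun y => !(y == name))
          = remaining.map pvName := by
        rw [hremdef, List.filter_map]; rfl
      have hcanon : pvCanon (first :: rest)
          = pvAgg ((first :: rest).filter (fun l => pvName l == name))
            :: (PySem.List.dedup (remaining.map pvName)).map
                 (fun n => pvAgg ((first :: rest).filter (fun l => pvName l == n))) := by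
        unfold pvCanon
        rw [List.map_cons, ← hname, dedup_cons_filter, hmapfilter, List.map_cons]
      rw [hcanon]
      have htail : (PySem.List.dedup (remaining.map pvName)).map
            (fun n => pvAgg ((first :: rest).filter (fun l => pvName l == n)))
          = pvCanon remaining := by
        unfold pvCanon
        apply List.map_congr_left
        intro n hn'
        have hnname : n ≠ name := by
          rw [PySem.List.dedup_eq_ofList, PySem.Set.mem_ofList] at hn'
          obtain ⟨l, hl, rfl⟩ := List.mem_map.mp hn'
          have := (List.mem_filter.mp (hremdef ▸ hl)).2
          simpa using this
        have h1 : (first :: rest).filter (fun l => pvName l == n)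
            = rest.filter (fun l => pvName l == n) := by
          rw [List.filter_cons_of_neg (by simpa using fun h => hnname h.symm)]
        have h2 : rest.filter (fun l => pvName l == n)
            = remaining.filter (fun l => pvName l == n) := by
          rw [hremdef, List.filter_filter]
          apply List.filter_congr
          intro l _
          by_cases hln : pvName l = n
          · simp [hln, hnname]
          · simp [hln]
        rw [h1, h2]
      have hhead : (first :: rest).filter (fun l => pvName l == name)
          = first :: same := by
        rw [List.filter_cons_of_pos (by simp [hname])]
      rw [htail, hrec, hhead]
      suffices hone : (if same.isEmpty then [first]
          else [(PySem.Dict.insert (PySem.Dict.mk first) "rest"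
                  (PySem.Str.join "\n" ((first :: same).map pvRest))).items])
          = [pvAgg (first :: same)] by
        rw [hone]; rfl
      unfold pvAgg
      match hsame : same with
      | [] =>
        rw [if_pos (by simp), pyGetD_zero_cons]
        rfl
      | s :: ss =>
        rw [if_neg (by simp), pyGetD_zero_cons]
        rfl

-- ===== VERDICT (by name: the statement is the Claim_ definition above) =====
theorem aggregate_logs_spec : Claim_equal_aggregate_logs := by
  intro logs _ _
  unfold Spec_aggregate_logs
  rw [aggregate_logs_eq_canon, alt_eq_canon]
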